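-- pv_equiv track=rewrite | github.com/MaxTha13/WhereBoxSystem | src/main.py | determine_box_side
-- ===== SOURCE A (Python) =====
-- SIDE_NAMES = ["Front", "Right", "Back", "Left", "Top", "Bottom"]
--
-- def determine_box_side(marker_ids, box_id):
--     """
--     Determines which side of the cube is facing the camera based on visible Marker IDs.
--     Each side has a specific range of IDs allocated.
--     """
--     if not marker_ids: return "Unknown"
--     # Base ID depends on the Box Number (1-18, 19-36, 37-54)
--     base_id = 1 if box_id == 1 else (19 if box_id == 2 else 37)
--     detected_sides = []
--     for mid in marker_ids:
--         rel = mid - base_id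
--         if 0 <= rel <= 17: detected_sides.append(rel // 3)  # 3 markers per side
--     if not detected_sides: return "Unknown"
--
--     # Choose the side with the most visible markers
--     most_common = max(set(detected_sides), key=detected_sides.count)
--     return SIDE_NAMES[most_common] if 0 <= most_common < len(SIDE_NAMES) else "Unknown"
-- ===== SOURCE B (Python) =====
-- SIDE_NAMES = ["Front", "Right", "Back", "Left", "Top", "Bottom"]
--
-- def determine_box_side(marker_ids, box_id):
--     if not marker_ids:
--         return "Unknown"
--     base_id = 1 if box_id == 1 else (19 if box_id == 2 else 37)
--     sides = sorted((mid - base_id) // 3 for mid in marker_ids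
--                    if 0 <= mid - base_id <= 17)
--     if not sides:
--         return "Unknown"
--     # sorted order groups equal sides into runs; the first run of maximal
--     # length belongs to the smallest such side, matching CPython's
--     # ascending small-int set iteration in max(set(...), key=count).
--     best, best_len = sides[0], 0
--     i, n = 0, len(sides)
--     while i < n:
--         j = i + 1
--         while j < n and sides[j] == sides[i]:
--             j += 1
--         if best_len < j - i:
--             best, best_len = sides[i], j - i
--         i = j
--     return SIDE_NAMES[best]
-- ===== Notes on version B (the rewrite author's own statement) =====
-- stated objective: alternative
-- what changed: Replaces the detected-sides list plus max(set(...), key=list.count) mode computation with sort-then-scan: sort the in-range side indices and find the first longest run of equal values in one linear sweep over the sorted list.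
import Mathlib
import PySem

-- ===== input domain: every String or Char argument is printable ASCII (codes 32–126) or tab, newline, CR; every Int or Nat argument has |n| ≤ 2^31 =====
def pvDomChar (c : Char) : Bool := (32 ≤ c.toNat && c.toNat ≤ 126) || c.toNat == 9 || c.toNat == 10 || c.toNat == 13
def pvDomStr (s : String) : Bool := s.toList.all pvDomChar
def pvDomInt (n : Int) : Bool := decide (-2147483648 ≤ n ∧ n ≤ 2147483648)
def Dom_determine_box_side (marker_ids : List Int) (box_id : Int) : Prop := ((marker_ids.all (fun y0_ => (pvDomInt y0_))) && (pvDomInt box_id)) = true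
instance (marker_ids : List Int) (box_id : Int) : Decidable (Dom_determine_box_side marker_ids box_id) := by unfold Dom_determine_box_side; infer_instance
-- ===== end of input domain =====

-- B replaces A's max(set(...), key=list.count) mode with sort-then-scan: sort the in-range side
-- indices and take the first longest run in one sweep (objective: alternative algorithm).

-- ===== PORT A =====
def pvSideNames : List String := ["Front", "Right", "Back", "Left", "Top", "Bottom"]

def determine_box_side (marker_ids : List Int) (box_id : Int) : String :=
  if marker_ids = [] then "Unknown" else
  let base_id : Int := if box_id = 1 then 1 else if box_id = 2 then 19 else 37
  let detected_sides := marker_ids.foldl (fun acc mid =>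
      let rel := mid - base_id
      if 0 ≤ rel ∧ rel ≤ 17 then acc ++ [PySem.Int.floordiv rel 3] else acc) []
  if detected_sides = [] then "Unknown" else
  -- set(detected_sides): elements are ints in 0..5 which hash to themselves without collision,
  -- so CPython iterates this set in ascending value order — modelled exactly as the sorted
  -- distinct elements.
  match PySem.List.sorted (PySem.Set.ofList detected_sides) (fun x => x) false with
  | [] => "Unknown"  -- unreachable: detected_sides ≠ []
  | h :: t =>
    -- max(s, key=detected_sides.count): keep the current best unless the new key is strictly larger
    let most_common := t.foldl (fun best x =>
        if PySem.List.count detected_sides best < PySem.List.count detected_sides x then x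
        else best) h
    if 0 ≤ most_common ∧ most_common < PySem.List.len pvSideNames
    then PySem.List.pyGetD pvSideNames most_common "Unknown"  -- guard makes the index in range
    else "Unknown"

-- ===== PORT B =====
-- the outer while loop of Source B: scan the sorted list run by run (the inner 'while sides[j] ==
-- sides[i]' advance is the takeWhile/dropWhile split), keeping the first strictly longest run
def pvRunBest : List Int → Int → Int → Int
  | [], best, _ => best
  | x :: xs, best, best_len =>
      let run : Int := 1 + ((xs.takeWhile (· == x)).length : Int)
      let rest := xs.dropWhile (· == x)
      if best_len < run then pvRunBest rest x run else pvRunBest rest best best_len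
  termination_by s _ _ => s.length
  decreasing_by
    all_goals
      have := List.length_dropWhile_le (· == x) xs
      simp only [List.length_cons]; omega

def determine_box_side_alt (marker_ids : List Int) (box_id : Int) : String :=
  if marker_ids = [] then "Unknown" else
  let base_id : Int := if box_id = 1 then 1 else if box_id = 2 then 19 else 37
  -- sorted((mid - base_id) // 3 for mid in marker_ids if 0 <= mid - base_id <= 17)
  let sides := PySem.List.sorted (marker_ids.filterMap (fun mid =>
      if 0 ≤ mid - base_id ∧ mid - base_id ≤ 17
      then some (PySem.Int.floordiv (mid - base_id) 3) else none)) (fun x => x) false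
  match sides with
  | [] => "Unknown"
  | h :: t => PySem.List.pyGetD pvSideNames (pvRunBest (h :: t) h 0) "Unknown"

-- ===== PRECONDITION & SPEC =====
def Spec_determine_box_side (marker_ids : List Int) (box_id : Int) (out : String) : Prop := out = determine_box_side_alt marker_ids box_id
instance (marker_ids : List Int) (box_id : Int) (out : String) : Decidable (Spec_determine_box_side marker_ids box_id out) := by unfold Spec_determine_box_side; infer_instance

-- ===== CLAIM (what is proved, stated in full; the proofs are below) =====
def Claim_equal_determine_box_side : Prop := ∀ (marker_ids : List Int) (box_id : Int), Dom_determine_box_side marker_ids box_id → Spec_determine_box_side marker_ids box_id (determine_box_side marker_ids box_id)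

-- ===== LEMMAS AND PROOFS =====

-- the runs of a list: (value, run length) for each maximal block of equal adjacent elements
def pvRuns : List Int → List (Int × Int)
  | [] => []
  | x :: xs => (x, 1 + ((xs.takeWhile (· == x)).length : Int)) :: pvRuns (xs.dropWhile (· == x))
  termination_by s => s.length
  decreasing_by
    have := List.length_dropWhile_le (· == x) xs
    simp only [List.length_cons]; omega

-- pvRunBest is the strict-improvement fold over the run list
lemma pvRunBest_eq_foldl (s : List Int) (b n : Int) :
    pvRunBest s b n
      = ((pvRuns s).foldl (fun st p => if st.2 < p.2 then p else st) (b, n)).1 := by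
  induction s using pvRuns.induct generalizing b n with
  | case1 => simp [pvRunBest, pvRuns]
  | case2 x xs ih =>
    rw [pvRunBest, pvRuns]
    simp only [List.foldl_cons]
    by_cases hc : n < 1 + ((xs.takeWhile (· == x)).length : Int)
    · simp only [hc, if_true, ih]
    · simp only [hc, if_false, ih]

-- A's fold result is a member of the folded-over list
lemma pv_fold_mem (c : Int → Int) (t : List Int) (h : Int) :
    (t.foldl (fun best x => if c best < c x then x else best) h) ∈ h :: t := by
  induction t generalizing h with
  | nil => simp
  | cons y t ih =>
    simp only [List.foldl_cons]
    by_cases hc : c h < c y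
    · simp only [hc, if_true]
      have := ih y
      simp only [List.mem_cons] at this ⊢
      exact Or.inr this
    · simp only [hc, if_false]
      have := ih h
      simp only [List.mem_cons] at this ⊢
      rcases this with h1 | h1
      · exact Or.inl h1
      · exact Or.inr (Or.inr h1)

-- over a nondecreasing list, the runs carry exactly the element counts,
-- their values are strictly increasing, and they have the same members
-- the head of a dropWhile fails the predicate
lemma pv_dropWhile_head (p : Int → Bool) : ∀ (l : List Int) (z : Int) (r' : List Int),
    l.dropWhile p = z :: r' → p z = false := by
  intro l
  induction l with
  | nil => simp [List.dropWhile]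
  | cons a l ih =>
    intro z r' h
    rw [List.dropWhile_cons] at h
    by_cases hp : p a = true
    · rw [if_pos hp] at h
      exact ih _ _ h
    · rw [if_neg hp] at h
      cases h
      simpa using hp

lemma pvRuns_spec (s : List Int) (hs : s.Pairwise (· ≤ ·)) :
    (∀ p ∈ pvRuns s, p.2 = (s.count p.1 : Int)) ∧
    ((pvRuns s).map Prod.fst).Pairwise (· < ·) ∧
    (∀ x, x ∈ (pvRuns s).map Prod.fst ↔ x ∈ s) := by
  induction s using pvRuns.induct with
  | case1 => simp [pvRuns]
  | case2 x xs ih =>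
    have hxle : ∀ y ∈ xs, x ≤ y := (List.pairwise_cons.mp hs).1
    have hxspw : xs.Pairwise (· ≤ ·) := (List.pairwise_cons.mp hs).2
    set t := xs.takeWhile (· == x) with htdef
    set r := xs.dropWhile (· == x) with hrdef
    have ht : ∀ y ∈ t, y = x := by
      intro y hy
      have := List.mem_takeWhile_imp hy
      simpa using this
    have hsplit : t ++ r = xs := List.takeWhile_append_dropWhile
    have hrpw : r.Pairwise (· ≤ ·) := hxspw.sublist (List.dropWhile_sublist _)
    have hrsub : ∀ y ∈ r, y ∈ xs := fun y hy => (List.dropWhile_sublist _).mem hy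
    have hgt : ∀ y ∈ r, x < y := by
      cases hre : r with
      | nil => simp
      | cons z r' =>
        have hz : (z == x) = false := pv_dropWhile_head _ xs z r' (by rw [← hrdef, hre])
        have hzx : z ≠ x := by simpa using hz
        have hzle : x ≤ z := hxle z (hrsub z (by rw [hre]; simp))
        have hzlt : x < z := lt_of_le_of_ne hzle (Ne.symm hzx)
        intro y hy
        rcases List.mem_cons.mp hy with h1 | h1
        · subst h1; exact hzlt
        · have := (List.pairwise_cons.mp (hre ▸ hrpw)).1 y h1
          omega
    obtain ⟨ih1, ih2, ih3⟩ := ih hrpw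
    have hxnr : x ∉ r := fun hx => lt_irrefl x (hgt x hx)
    have htc : t.count x = t.length :=
      List.count_eq_length.mpr (fun b hb => by simp [ht b hb])
    have hcx : (x :: xs).count x = 1 + t.length := by
      rw [List.count_cons_self, ← hsplit, List.count_append, List.count_eq_zero.mpr hxnr, htc]
      omega
    have hcy : ∀ y ∈ r, (x :: xs).count y = r.count y := by
      intro y hy
      have hyx : y ≠ x := Ne.symm (ne_of_lt (hgt y hy))
      have hty : t.count y = 0 :=
        List.count_eq_zero.mpr (fun hyt => hyx (ht y hyt))
      rw [List.count_cons_of_ne (Ne.symm hyx), ← hsplit, List.count_append, hty]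
      omega
    rw [pvRuns]
    refine ⟨?_, ?_, ?_⟩
    · intro p hp
      rcases List.mem_cons.mp hp with h1 | h1
      · subst h1
        simp only [hcx]
        push_cast
        ring
      · have hp1r : p.1 ∈ r := (ih3 p.1).mp (List.mem_map_of_mem h1)
        rw [ih1 p h1, hcy p.1 hp1r]
    · rw [List.map_cons]
      rw [List.pairwise_cons]
      exact ⟨fun y hy => hgt y ((ih3 y).mp hy), ih2⟩
    · intro y
      rw [List.map_cons, List.mem_cons, List.mem_cons, ih3 y]
      constructor
      · rintro (h1 | h1)
        · exact Or.inl h1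
        · exact Or.inr (hrsub y h1)
      · rintro (h1 | h1)
        · exact Or.inl h1
        · rw [← hsplit] at h1
          rcases List.mem_append.mp h1 with h2 | h2
          · exact Or.inl (ht y h2)
          · exact Or.inr h2

-- the pair fold is the value fold when every pair carries its key
lemma pv_pairs_fold (c : Int → Int) (ps : List (Int × Int)) (b : Int)
    (hps : ∀ p ∈ ps, p.2 = c p.1) :
    ((ps.foldl (fun st p => if st.2 < p.2 then p else st) (b, c b)).1)
      = (ps.map Prod.fst).foldl (fun best x => if c best < c x then x else best) b := by
  induction ps generalizing b with
  | nil => rfl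
  | cons p ps ih =>
    have hp : p = (p.1, c p.1) := by
      rw [← hps p (by simp)]
    simp only [List.foldl_cons, List.map_cons]
    by_cases hc : c b < c p.1
    · rw [show ((if (b, c b).2 < p.2 then p else (b, c b)) = (p.1, c p.1)) by
        rw [hp]; simp [hc]]
      rw [ih p.1 (fun q hq => hps q (by simp [hq]))]
      simp [hc]
    · rw [show ((if (b, c b).2 < p.2 then p else (b, c b)) = (b, c b)) by
        rw [hp]; simp [hc]]
      rw [ih b (fun q hq => hps q (by simp [hq]))]
      simp [hc]

-- A's accumulating loop over marker_ids builds exactly B's comprehension (filterMap)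
lemma pv_d_eq (ms : List Int) (base : Int) (acc : List Int) :
    ms.foldl (fun acc mid =>
      let rel := mid - base
      if 0 ≤ rel ∧ rel ≤ 17 then acc ++ [PySem.Int.floordiv rel 3] else acc) acc
    = acc ++ ms.filterMap (fun mid =>
      if 0 ≤ mid - base ∧ mid - base ≤ 17
      then some (PySem.Int.floordiv (mid - base) 3) else none) := by
  induction ms generalizing acc with
  | nil => simp
  | cons m ms ih =>
    simp only [List.foldl_cons, List.filterMap_cons]
    by_cases hg : 0 ≤ m - base ∧ m - base ≤ 17
    · rw [if_pos hg, if_pos hg, ih, List.append_assoc, List.singleton_append]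
    · rw [if_neg hg, if_neg hg, ih]

-- every detected side index lies in 0..5
lemma pv_d_bounds (ms : List Int) (base : Int) :
    ∀ v ∈ ms.filterMap (fun mid =>
      if 0 ≤ mid - base ∧ mid - base ≤ 17
      then some (PySem.Int.floordiv (mid - base) 3) else none), 0 ≤ v ∧ v ≤ 5 := by
  intro v hv
  rw [List.mem_filterMap] at hv
  obtain ⟨mid, _, hmid⟩ := hv
  by_cases hg : 0 ≤ mid - base ∧ mid - base ≤ 17
  · rw [if_pos hg] at hmid
    obtain rfl : PySem.Int.floordiv (mid - base) 3 = v := Option.some.inj hmid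
    have h1 := PySem.Int.le_floordiv_iff_mul_le (a := mid - base) (b := 3) (q := 0) (by omega)
    have h2 := PySem.Int.floordiv_lt_iff_lt_mul (a := mid - base) (b := 3) (q := 6) (by omega)
    omega
  · rw [if_neg hg] at hmid
    exact absurd hmid (by simp)

-- ===== VERDICT (by name: the statement is the Claim_ definition above) =====
theorem determine_box_side_spec : Claim_equal_determine_box_side := by
  intro marker_ids box_id _
  unfold Spec_determine_box_side determine_box_side determine_box_side_alt
  by_cases hemp : marker_ids = []
  · simp [hemp]
  simp only [hemp, if_false]
  set base := if box_id = 1 then (1 : Int) else if box_id = 2 then 19 else 37 with hbase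
  have hd : marker_ids.foldl (fun acc mid =>
      let rel := mid - base
      if 0 ≤ rel ∧ rel ≤ 17 then acc ++ [PySem.Int.floordiv rel 3] else acc) []
      = marker_ids.filterMap (fun mid =>
      if 0 ≤ mid - base ∧ mid - base ≤ 17
      then some (PySem.Int.floordiv (mid - base) 3) else none) := by
    rw [pv_d_eq]; simp
  rw [hd]
  set d := marker_ids.filterMap (fun mid =>
      if 0 ≤ mid - base ∧ mid - base ≤ 17
      then some (PySem.Int.floordiv (mid - base) 3) else none) with hdd
  have hbnd : ∀ v ∈ d, 0 ≤ v ∧ v ≤ 5 := by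
    rw [hdd]; exact pv_d_bounds marker_ids base
  set s := PySem.List.sorted d (fun x => x) false with hsd
  have hperm : s.Perm d := PySem.List.sorted_perm d (fun x => x) false
  by_cases hdnil : d = []
  · have hsnil : s = [] := by rw [hsd]; exact (PySem.List.sorted_eq_nil_iff d (fun x => x) false).mpr hdnil
    rw [hdnil, hsnil]
    simp
  · have hsne : s ≠ [] := fun hh => hdnil ((PySem.List.sorted_eq_nil_iff d (fun x => x) false).mp (hsd ▸ hh))
    cases hse : s with
    | nil => exact absurd hse hsne
    | cons h t =>
      rw [hse] at hperm
      have hspw : (h :: t).Pairwise (· ≤ ·) := by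
        have := PySem.List.sorted_pairwise d (fun x => x)
        rw [← hsd, hse] at this
        exact this
      obtain ⟨hcnt, hlt, hmem⟩ := pvRuns_spec (h :: t) hspw
      have hruns : pvRuns (h :: t)
          = (h, 1 + ((t.takeWhile (· == h)).length : Int)) :: pvRuns (t.dropWhile (· == h)) := by
        rw [pvRuns]
      set c0 : Int := 1 + ((t.takeWhile (· == h)).length : Int) with hc0d
      set ps := pvRuns (t.dropWhile (· == h)) with hpsd
      have hc0 : c0 = (((h :: t).count h : Nat) : Int) := hcnt (h, c0) (by rw [hruns]; simp)
      have hcpos : (0 : Int) < c0 := by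
        have : 0 < (h :: t).count h := List.count_pos_iff.mpr (by simp)
        omega
      -- B's value is the strict-improvement fold over the distinct sides with their counts
      have hB : pvRunBest (h :: t) h 0
          = (ps.map Prod.fst).foldl (fun best x =>
              if (((h :: t).count best : Nat) : Int) < (((h :: t).count x : Nat) : Int)
              then x else best) h := by
        rw [pvRunBest_eq_foldl, hruns]
        simp only [List.foldl_cons]
        rw [show ((if ((h : Int), (0 : Int)).2 < ((h : Int), c0).2 then ((h : Int), c0) else ((h : Int), (0 : Int))) = ((h : Int), c0)) from by simp [hcpos]]
        rw [hc0]
        exact pv_pairs_fold (fun x => (((h :: t).count x : Nat) : Int)) ps h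
          (fun q hq => hcnt q (by rw [hruns]; exact List.mem_cons_of_mem _ hq))
      -- A's sorted distinct list is the run values
      have hueq : PySem.List.sorted (PySem.Set.ofList d) (fun x => x) false
          = h :: ps.map Prod.fst := by
        have hnd1 : ((pvRuns (h :: t)).map Prod.fst).Nodup := hlt.imp (fun hab => ne_of_lt hab)
        have hperm2 : ((pvRuns (h :: t)).map Prod.fst).Perm (PySem.Set.ofList d) :=
          (List.perm_ext_iff_of_nodup hnd1 (PySem.Set.nodup_ofList d)).mpr
            (fun a => by rw [hmem a, PySem.Set.mem_ofList, hperm.mem_iff])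
        have := PySem.List.sorted_eq_of_perm_of_pairwise_lt (PySem.Set.ofList d)
          ((pvRuns (h :: t)).map Prod.fst) (fun x => x) hperm2 hlt
        rw [hruns, List.map_cons] at this
        exact this
      rw [if_neg hdnil, hueq]
      dsimp only []
      -- A's fold compares counts in d; these are the counts in the sorted list
      have hAfold : (ps.map Prod.fst).foldl (fun best x =>
            if PySem.List.count d best < PySem.List.count d x then x else best) h
          = pvRunBest (h :: t) h 0 := by
        rw [hB]
        congr 1
        funext best x
        have hiff : (PySem.List.count d best < PySem.List.count d x)
            ↔ ((((h :: t).count best : Nat) : Int) < (((h :: t).count x : Nat) : Int)) := by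
          rw [PySem.List.count_eq, PySem.List.count_eq, Nat.cast_lt,
            ← hperm.count_eq best, ← hperm.count_eq x]
        exact if_congr hiff rfl rfl
      rw [hAfold]
      -- the common result is a detected side, hence in 0..5 and in range of SIDE_NAMES
      have hrmem : pvRunBest (h :: t) h 0 ∈ d := by
        have h1 : pvRunBest (h :: t) h 0 ∈ h :: ps.map Prod.fst := by
          rw [hB]
          exact pv_fold_mem _ _ _
        have h2 : pvRunBest (h :: t) h 0 ∈ (pvRuns (h :: t)).map Prod.fst := by
          rw [hruns, List.map_cons]
          exact h1
        exact hperm.mem_iff.mp ((hmem _).mp h2)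
      have hrb := hbnd _ hrmem
      have hguard : 0 ≤ pvRunBest (h :: t) h 0 ∧
          pvRunBest (h :: t) h 0 < PySem.List.len pvSideNames := by
        refine ⟨hrb.1, ?_⟩
        rw [PySem.List.len_eq]
        simp only [pvSideNames, List.length]
        omega
      rw [if_pos hguard]
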